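-- pv_equiv track=rewrite | github.com/Mithilesh3/product-test | backend/app/modules/reports/deterministic_pipeline.py | _pythagorean_email_number
-- ===== SOURCE A (Python) =====
-- from typing import Any, Dict, List
--
-- def _safe_text(value: Any) -> str:
--     return str(value or "").strip()
--
-- PYTHAGOREAN_MAP = {
--     **{ch: 1 for ch in "AJSajs"},
--     **{ch: 2 for ch in "BKTbkt"},
--     **{ch: 3 for ch in "CLUclu"},
--     **{ch: 4 for ch in "DMVdmv"},
--     **{ch: 5 for ch in "ENWenw"},
--     **{ch: 6 for ch in "FOXfox"},
--     **{ch: 7 for ch in "GPYgpy"},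
--     **{ch: 8 for ch in "HQZhqz"},
--     **{ch: 9 for ch in "IRir"},
-- }
--
-- def _reduce_to_single_digit(value: int) -> int:
--     total = int(value)
--     while total > 9:
--         total = sum(int(digit) for digit in str(total))
--     return total
--
-- def _pythagorean_email_number(email: str) -> int | None:
--     text = _safe_text(email)
--     if not text:
--         return None
--     local = text.split("@")[0]
--     letters = [ch for ch in local if ch.isalpha()]
--     if not letters:
--         return None
--     total = sum(PYTHAGOREAN_MAP.get(ch, 0) for ch in letters)
--     if total <= 0:
--         return None
--     return _reduce_to_single_digit(total)
-- ===== SOURCE B (Python) =====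
-- def _pythagorean_email_number(email):
--     text = (email or "").strip()
--     if not text:
--         return None
--     total = 0
--     found = False
--     for ch in text:
--         if ch == "@":
--             break
--         if ch.isalpha():
--             found = True
--             lo = ch.lower()
--             if "a" <= lo <= "z":
--                 total += (ord(lo) - 97) % 9 + 1
--     if not found or total <= 0:
--         return None
--     return 1 + (total - 1) % 9
-- ===== Notes on version B (the rewrite author's own statement) =====
-- stated objective: simpler
-- what changed: B replaces A's split/filter/dict passes and the iterative digit-summing while-loop by a single scan that breaks at the first at-sign, computes each letter's value arithmetically as (ord(lower(ch))-97)%9+1 instead of a dict lookup, and returns the closed-form digital root 1+(total-1)%9 instead of looping.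
import Mathlib
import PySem

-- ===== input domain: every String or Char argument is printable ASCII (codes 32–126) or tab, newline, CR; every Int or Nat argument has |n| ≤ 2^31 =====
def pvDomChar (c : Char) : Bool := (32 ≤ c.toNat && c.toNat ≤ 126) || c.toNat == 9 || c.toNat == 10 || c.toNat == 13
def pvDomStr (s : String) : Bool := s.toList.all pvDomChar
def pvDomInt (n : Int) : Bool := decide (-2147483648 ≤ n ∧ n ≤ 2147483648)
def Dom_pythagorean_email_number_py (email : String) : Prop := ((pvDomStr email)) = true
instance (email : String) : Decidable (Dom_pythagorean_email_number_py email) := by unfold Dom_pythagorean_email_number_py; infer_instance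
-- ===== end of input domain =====

-- B replaces A's split/filter/dict-sum passes and the digit-summing while-loop by a single
-- break-at-'@' scan with an arithmetic letter value and the closed-form digital root (objective: simpler).

-- ===== PORT A =====
-- helpers of the port of A (the digit-sum termination lemmas the recursive pvReduce cites live here)

-- int(digit) for one character of str(total); the digits of str(total) always parse, so the 0 default is never used
def pvDigitVal (c : Char) : Int := (PySem.Int.ofChars? [c]).getD 0

-- sum(int(digit) for digit in str(total))
def pvDigitSum (t : Int) : Int := ((PySem.Int.toChars t).map pvDigitVal).sum

lemma pvToDigitsCore_eq (f : Nat) : ∀ (n : Nat) (acc : List Char), 0 < n → n < f →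
    Nat.toDigitsCore 10 f n acc = ((Nat.digits 10 n).map Nat.digitChar).reverse ++ acc := by
  induction f with
  | zero => intro n acc h1 h2; omega
  | succ f ih =>
    intro n acc h1 h2
    rw [Nat.toDigitsCore]
    by_cases h10 : n / 10 = 0
    · simp [h10, Nat.digits_def' (by norm_num : (1:Nat) < 10) h1]
    · rw [if_neg h10, ih (n / 10) _ (by omega) (by omega),
        Nat.digits_def' (by norm_num : (1:Nat) < 10) h1]
      simp

lemma pvDigitVal_digitChar : ∀ d < 10, pvDigitVal (Nat.digitChar d) = (d : Int) := by decide

lemma pvDigitSum_eq (t : Int) (h : 0 < t) :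
    pvDigitSum t = ((Nat.digits 10 t.toNat).sum : Int) := by
  have ht : ¬ t < 0 := by omega
  have h1 : 0 < t.toNat := by omega
  rw [pvDigitSum, PySem.Int.toChars, if_neg ht, Nat.toDigits,
    pvToDigitsCore_eq (t.toNat + 1) t.toNat [] h1 (by omega)]
  rw [List.append_nil, List.map_reverse, List.map_map, List.sum_reverse]
  have : ∀ d ∈ Nat.digits 10 t.toNat, (pvDigitVal ∘ Nat.digitChar) d = (d : Int) := by
    intro d hd
    exact pvDigitVal_digitChar d (Nat.digits_lt_base (by norm_num) hd)
  rw [List.map_congr_left this, Nat.cast_list_sum]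

lemma pvSumDigits_lt (n : Nat) (h : 10 ≤ n) : (Nat.digits 10 n).sum < n := by
  rw [Nat.digits_def' (by norm_num : (1:Nat) < 10) (by omega)]
  have := Nat.digit_sum_le 10 (n / 10)
  simp only [List.sum_cons]
  omega

lemma pvDigitSum_lt (t : Int) (h : 9 < t) : (pvDigitSum t).toNat < t.toNat := by
  rw [pvDigitSum_eq t (by omega)]
  have := pvSumDigits_lt t.toNat (by omega)
  omega

-- _reduce_to_single_digit
def pvReduce (t : Int) : Int :=
  if 9 < t then pvReduce (pvDigitSum t) else t
termination_by t.toNat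
decreasing_by exact pvDigitSum_lt t (by omega)

-- PYTHAGOREAN_MAP, built by the same per-string comprehensions merged left to right
def pvDictAdd (d : PySem.Dict Char Int) (s : String) (v : Int) : PySem.Dict Char Int :=
  s.toList.foldl (fun d ch => PySem.Dict.insert d ch v) d

def pvPythagoreanMap : PySem.Dict Char Int :=
  pvDictAdd (pvDictAdd (pvDictAdd (pvDictAdd (pvDictAdd (pvDictAdd (pvDictAdd (pvDictAdd
    (pvDictAdd PySem.Dict.empty "AJSajs" 1) "BKTbkt" 2) "CLUclu" 3) "DMVdmv" 4)
    "ENWenw" 5) "FOXfox" 6) "GPYgpy" 7) "HQZhqz" 8) "IRir" 9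

def pythagorean_email_number_py (email : String) : Option Int :=
  let text := PySem.Str.strip email          -- _safe_text: on a str argument, str(email or "").strip() is email.strip()
  if text = "" then none
  else
    -- text.split("@")[0]: split with a nonempty separator never fails and returns a nonempty list, so the defaults are never used
    let local_ := ((PySem.Str.split? text "@").getD []).headD ""
    let letters := local_.toList.filter (fun ch => PySem.Str.isalpha ch)
    if letters = [] then none
    else
      let total := (letters.map (fun ch => PySem.Dict.getD pvPythagoreanMap ch 0)).sum
      if total ≤ 0 then none else some (pvReduce total)

-- ===== PORT B =====
-- (ord(lo) - 97) % 9 + 1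
def pvLetterVal (lo : Char) : Int := PySem.Int.mod ((lo.toNat : Int) - 97) 9 + 1

-- the for-loop over text with its break at '@' (state: found, total)
def pvScan : List Char → Bool → Int → Bool × Int
  | [], found, total => (found, total)
  | ch :: rest, found, total =>
    if ch = '@' then (found, total)
    else if PySem.Str.isalpha ch then
      let lo := PySem.Chars.lowerChar ch
      if 'a' ≤ lo ∧ lo ≤ 'z' then pvScan rest true (total + pvLetterVal lo)
      else pvScan rest true total
    else pvScan rest found total

def pythagorean_email_number_py_alt (email : String) : Option Int :=
  let text := PySem.Str.strip email
  if text = "" then none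
  else
    let st := pvScan text.toList false 0
    if st.1 = false ∨ st.2 ≤ 0 then none
    else some (1 + PySem.Int.mod (st.2 - 1) 9)

-- ===== PRECONDITION & SPEC =====
def Spec_pythagorean_email_number_py (email : String) (out : Option Int) : Prop := out = pythagorean_email_number_py_alt email
instance (email : String) (out : Option Int) : Decidable (Spec_pythagorean_email_number_py email out) := by unfold Spec_pythagorean_email_number_py; infer_instance

-- ===== CLAIM (what is proved, stated in full; the proofs are below) =====
def Claim_equal_pythagorean_email_number_py : Prop := ∀ (email : String), Dom_pythagorean_email_number_py email → Spec_pythagorean_email_number_py email (pythagorean_email_number_py email)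

-- ===== LEMMAS AND PROOFS =====

lemma pvSumDigits_pos (n : Nat) (h : 1 ≤ n) : 0 < (Nat.digits 10 n).sum := by
  induction n using Nat.strong_induction_on with
  | _ n ih =>
    rw [Nat.digits_def' (by norm_num : (1:Nat) < 10) (by omega)]
    simp only [List.sum_cons]
    by_cases hm : n % 10 = 0
    · have h10 : 1 ≤ n / 10 := by omega
      have := ih (n / 10) (by omega) h10
      omega
    · omega

-- B's per-letter contribution (0 for an alphabetic character outside a-z/A-Z)
def pvContribB (ch : Char) : Int :=
  if 'a' ≤ PySem.Chars.lowerChar ch ∧ PySem.Chars.lowerChar ch ≤ 'z' then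
    pvLetterVal (PySem.Chars.lowerChar ch) else 0

-- on ASCII codes, A's dict lookup for a letter equals B's arithmetic value and is at least 1
set_option maxRecDepth 4096 in
lemma pvChar_ok : ∀ n < 127, PySem.Str.isalpha (Char.ofNat n) = true →
    PySem.Dict.getD pvPythagoreanMap (Char.ofNat n) 0 = pvContribB (Char.ofNat n) ∧
    1 ≤ PySem.Dict.getD pvPythagoreanMap (Char.ofNat n) 0 := by decide

-- closed-form digital root: the reduction loop computes 1 + (t-1) % 9
lemma pvReduce_eq (t : Int) (h : 1 ≤ t) : pvReduce t = 1 + PySem.Int.mod (t - 1) 9 := by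
  have main : ∀ n : Nat, ∀ t : Int, t.toNat = n → 1 ≤ t →
      pvReduce t = 1 + PySem.Int.mod (t - 1) 9 := by
    intro n
    induction n using Nat.strong_induction_on with
    | _ n ih =>
      intro t hn ht
      rw [pvReduce]
      by_cases h9 : 9 < t
      · rw [if_pos h9]
        have hsum := pvDigitSum_eq t (by omega)
        have hpos : 0 < pvDigitSum t := by
          rw [hsum]; have := pvSumDigits_pos t.toNat (by omega); omega
        have hlt := pvDigitSum_lt t h9
        rw [ih (pvDigitSum t).toNat (by omega) (pvDigitSum t) rfl (by omega)]
        have hmod9 : t.toNat % 9 = (Nat.digits 10 t.toNat).sum % 9 := Nat.modEq_nine_digits_sum t.toNat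
        rw [PySem.Int.mod_eq_emod_of_pos (by norm_num), PySem.Int.mod_eq_emod_of_pos (by norm_num), hsum]
        omega
      · rw [if_neg h9, PySem.Int.mod_eq_emod_of_pos (by norm_num)]
        omega
  exact main t.toNat t rfl h

-- the scan loop of B is a fold over the prefix before the first '@'
lemma pvScan_eq (l : List Char) (found : Bool) (total : Int) :
    pvScan l found total =
      ((found || ((l.takeWhile (fun c => c != '@')).any PySem.Str.isalpha)),
       total + (((l.takeWhile (fun c => c != '@')).filter PySem.Str.isalpha).map pvContribB).sum) := by
  induction l generalizing found total with
  | nil => simp [pvScan]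
  | cons c rest ih =>
    by_cases hc : c = '@'
    · subst hc; simp [pvScan]
    · by_cases ha : PySem.Str.isalpha c = true
      · by_cases hr : 'a' ≤ PySem.Chars.lowerChar c ∧ PySem.Chars.lowerChar c ≤ 'z'
        · simp only [pvScan, if_neg hc, if_pos ha, if_pos hr, ih]
          simp [hc, ha, pvContribB, hr.1, hr.2]
          omega
        · simp only [pvScan, if_neg hc, if_pos ha, if_neg hr, ih]
          simp [hc, ha, pvContribB, if_neg hr]
      · simp only [pvScan, if_neg hc, if_neg ha, ih]
        simp [hc, ha]

-- splitOn.go with separator "@": one unfolding step for each shape of the input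
lemma pvGo_nil (f : Nat) (cur : List Char) (acc : List (List Char)) :
    PySem.Chars.splitOn.go ['@'] (f+1) [] cur acc = (cur.reverse :: acc).reverse := by
  rw [PySem.Chars.splitOn.go]
  omega

lemma pvGo_ne (f : Nat) (c : Char) (rest cur : List Char) (acc : List (List Char)) (h : ¬ c = '@') :
    PySem.Chars.splitOn.go ['@'] (f+1) (c::rest) cur acc
      = PySem.Chars.splitOn.go ['@'] f rest (c :: cur) acc := by
  rw [PySem.Chars.splitOn.go]
  rw [if_neg]
  simp only [List.isPrefixOf, Bool.and_eq_true, beq_iff_eq, and_true]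
  exact fun h' => h h'.symm

lemma pvGo_at (f : Nat) (rest cur : List Char) (acc : List (List Char)) :
    PySem.Chars.splitOn.go ['@'] (f+1) ('@'::rest) cur acc
      = PySem.Chars.splitOn.go ['@'] f rest [] (cur.reverse :: acc) := by
  rw [PySem.Chars.splitOn.go]
  rw [if_pos] <;> simp [List.isPrefixOf]

-- splitOn.go with enough fuel: the first produced piece is cur.reverse ++ the prefix before the first '@'
lemma pvGo_eq (f : Nat) : ∀ (l cur : List Char) (acc : List (List Char)), l.length < f →
    ∃ tl, PySem.Chars.splitOn.go ['@'] f l cur acc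
      = acc.reverse ++ (cur.reverse ++ l.takeWhile (fun c => c != '@')) :: tl := by
  induction f with
  | zero => intro l cur acc h; omega
  | succ f ih =>
    intro l cur acc h
    match l with
    | [] => exact ⟨[], by simp [pvGo_nil]⟩
    | c :: rest =>
      by_cases hc : c = '@'
      · subst hc
        obtain ⟨tl, htl⟩ := ih rest [] (cur.reverse :: acc) (by simpa using h)
        refine ⟨(([] : List Char).reverse ++ rest.takeWhile (fun c => c != '@')) :: tl, ?_⟩
        rw [pvGo_at, htl]
        simp
      · obtain ⟨tl, htl⟩ := ih rest (c :: cur) acc (by simpa using h)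
        refine ⟨tl, ?_⟩
        rw [pvGo_ne _ _ _ _ _ hc, htl]
        simp [hc]

-- s.split("@")'s first piece is the prefix of s before the first '@'
lemma pvSplitOn_head (s : List Char) :
    ∃ tl, PySem.Chars.splitOn s ['@'] = (s.takeWhile (fun c => c != '@')) :: tl := by
  obtain ⟨tl, htl⟩ := pvGo_eq (s.length + 1) s [] [] (by omega)
  exact ⟨tl, by simpa using htl⟩

-- characters of the stripped string come from the original string
lemma pvMem_strip (l : List Char) (c : Char) (hc : c ∈ PySem.Chars.strip l) : c ∈ l := by
  unfold PySem.Chars.strip PySem.Chars.rstrip PySem.Chars.lstrip at hc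
  have h1 := (List.dropWhile_sublist (l := (List.dropWhile PySem.Chars.isspace l).reverse)
    PySem.Chars.isspace).subset (List.mem_reverse.mp hc)
  exact (List.dropWhile_sublist PySem.Chars.isspace).subset (List.mem_reverse.mp h1)

-- a sum of values that are each at least 1, over a nonempty list, is at least 1
lemma pvSum_one_le (l : List Int) (h : ∀ x ∈ l, 1 ≤ x) (hne : l ≠ []) : 1 ≤ l.sum := by
  cases l with
  | nil => simp at hne
  | cons x t =>
    have hx := h x (by simp)
    have ht : 0 ≤ t.sum := List.sum_nonneg (fun y hy => by have := h y (by simp [hy]); omega)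
    simp only [List.sum_cons]
    omega

-- ===== VERDICT (by name: the statement is the Claim_ definition above) =====
theorem pythagorean_email_number_py_spec : Claim_equal_pythagorean_email_number_py := by
  intro email hdom
  unfold Spec_pythagorean_email_number_py pythagorean_email_number_py pythagorean_email_number_py_alt
  by_cases hempty : PySem.Str.strip email = ""
  · simp [hempty]
  · simp only [if_neg hempty]
    set text := PySem.Str.strip email with htext
    set pre := text.toList.takeWhile (fun c => c != '@') with hpre
    -- A's local part: text.split("@")[0] has character list pre
    obtain ⟨tl, hsplit⟩ := pvSplitOn_head text.toList
    have hmap := PySem.Str.split?_map text "@"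
    have hchars : PySem.Chars.split? text.toList "@".toList
        = some (PySem.Chars.splitOn text.toList ['@']) := by
      simp [PySem.Chars.split?]
    rw [hchars, hsplit] at hmap
    obtain ⟨parts, hparts⟩ : ∃ ps, PySem.Str.split? text "@" = some ps := by
      cases h : PySem.Str.split? text "@" with
      | none => rw [h] at hmap; simp at hmap
      | some ps => exact ⟨ps, rfl⟩
    rw [hparts] at hmap
    simp only [Option.map_some, Option.some.injEq] at hmap
    match parts, hmap with
    | p0 :: rest, hmap =>
      have hp0 : p0.toList = pre := by
        have := congrArg (fun l => l.headD ([] : List Char)) hmap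
        simpa using this
      -- every character of pre is a domain character
      have hpre_dom : ∀ c ∈ pre, pvDomChar c = true := by
        intro c hc
        have h1 : c ∈ text.toList := (List.takeWhile_sublist _).subset hc
        rw [htext, PySem.Str.toList_strip] at h1
        have h2 := pvMem_strip email.toList c h1
        have := hdom
        unfold Dom_pythagorean_email_number_py pvDomStr at this
        exact List.all_eq_true.mp this c h2
      -- on such characters A's dict value is B's arithmetic value, and is at least 1
      have hchar : ∀ c ∈ pre, PySem.Str.isalpha c = true →
          PySem.Dict.getD pvPythagoreanMap c 0 = pvContribB c ∧
          1 ≤ PySem.Dict.getD pvPythagoreanMap c 0 := by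
        intro c hc ha
        have hd := hpre_dom c hc
        have h127 : c.toNat < 127 := by
          simp only [pvDomChar, Bool.or_eq_true, Bool.and_eq_true, decide_eq_true_eq,
            beq_iff_eq] at hd
          omega
        have := pvChar_ok c.toNat h127
        rw [Char.ofNat_toNat] at this
        exact this ha
      rw [pvScan_eq]
      simp only [hparts, Option.getD_some, List.headD_cons, hp0, Bool.false_or, zero_add]
      rw [← hpre]
      by_cases hl : pre.filter (fun ch => PySem.Str.isalpha ch) = []
      · -- no letters: both return none
        have hany : pre.any PySem.Str.isalpha = false :=
          List.any_eq_false.mpr (List.filter_eq_nil_iff.mp hl)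
        rw [if_pos hl, if_pos (Or.inl (by simp [hany]))]
      · -- letters present: totals agree and both take the positive branch
        have htot_eq : (pre.filter (fun ch => PySem.Str.isalpha ch)).map
              (fun ch => PySem.Dict.getD pvPythagoreanMap ch 0)
            = (pre.filter PySem.Str.isalpha).map pvContribB := by
          apply List.map_congr_left
          intro c hc
          have := List.mem_filter.mp hc
          exact (hchar c this.1 this.2).1
        have htot_pos : 1 ≤ ((pre.filter (fun ch => PySem.Str.isalpha ch)).map
            (fun ch => PySem.Dict.getD pvPythagoreanMap ch 0)).sum := by
          apply pvSum_one_le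
          · intro x hx
            obtain ⟨c, hc, hcx⟩ := List.mem_map.mp hx
            have := List.mem_filter.mp hc
            rw [← hcx]
            exact (hchar c this.1 this.2).2
          · simp [hl]
        have hBpos : 1 ≤ ((pre.filter PySem.Str.isalpha).map pvContribB).sum :=
          htot_eq ▸ htot_pos
        have hany : pre.any PySem.Str.isalpha = true := by
          obtain ⟨c, hc⟩ := List.exists_mem_of_ne_nil _ hl
          have := List.mem_filter.mp hc
          exact List.any_eq_true.mpr ⟨c, this.1, this.2⟩
        rw [if_neg hl, if_neg (by omega), if_neg (by
          rintro (h1 | h2)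
          · simp [hany] at h1
          · omega)]
        rw [pvReduce_eq _ htot_pos, htot_eq]
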